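-- pv_equiv track=rewrite | github.com/amarmaduke/ankideckffs | ffs/parser.py | fix_expanded_stream
-- ===== SOURCE A (Python) =====
-- def fix_expanded_stream(stream):
--     result = []
--     text = ""
--     for token in stream:
--         if token == "[[":
--             result.append(text)
--             text = ""
--             result.append("[[")
--         elif token == "]]":
--             result.append(text)
--             text = ""
--             result.append("]]")
--         else:
--             text = text + token
--     result.append(text)
--     return result
-- ===== SOURCE B (Python) =====
-- def fix_expanded_stream(stream):
--     # Index-then-slice: find delimiter positions, emit joined slices between them.
--     toks = list(stream)
--     out = []
--     prev = 0
--     for i, t in enumerate(toks):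
--         if t == "[[" or t == "]]":
--             out.append("".join(toks[prev:i]))
--             out.append(t)
--             prev = i + 1
--     out.append("".join(toks[prev:]))
--     return out
-- ===== Notes on version B (the rewrite author's own statement) =====
-- stated objective: alternative
-- what changed: Replaces A's flush-on-delimiter accumulator (growing result list plus a pending text buffer rebuilt by string concatenation) with an index-then-slice pass: enumerate the tokens, and at each delimiter emit the ''.join of the slice since the previous delimiter, so no per-token string concatenation or pending-text state is kept.
import Mathlib
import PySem

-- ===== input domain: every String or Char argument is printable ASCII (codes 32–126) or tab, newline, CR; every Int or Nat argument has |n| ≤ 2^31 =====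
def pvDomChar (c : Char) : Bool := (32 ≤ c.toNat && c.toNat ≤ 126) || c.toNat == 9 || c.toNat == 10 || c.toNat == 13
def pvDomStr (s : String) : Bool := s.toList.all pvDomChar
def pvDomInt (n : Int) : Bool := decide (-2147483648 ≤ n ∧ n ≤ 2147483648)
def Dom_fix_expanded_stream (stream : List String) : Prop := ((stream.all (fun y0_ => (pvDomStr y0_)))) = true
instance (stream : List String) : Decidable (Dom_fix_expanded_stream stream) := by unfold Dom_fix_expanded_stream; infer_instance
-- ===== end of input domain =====

-- B replaces A's flush-on-delimiter accumulator with an index-then-slice pass (join the slices between delimiter positions); same values.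

-- ===== PORT A =====
-- A: forward loop with accumulator (result, text); flush text on each delimiter, append trailing text at the end.
def fix_expanded_stream (stream : List String) : List String :=
  let st := stream.foldl (fun (st : List String × String) token =>
    let (result, text) := st
    if token = "[[" then (result ++ [text] ++ ["[["], "")
    else if token = "]]" then (result ++ [text] ++ ["]]"], "")
    else (result, text ++ token)) ([], "")
  st.1 ++ [st.2]

-- ===== PORT B =====
-- B: enumerate the tokens keeping (out, prev); on a delimiter emit the joined
-- slice toks[prev:i] and the delimiter and set prev = i+1; finally emit toks[prev:].
def fix_expanded_stream_alt (stream : List String) : List String :=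
  let toks := stream
  let st := (PySem.List.enumerate toks 0).foldl
    (fun (st : List String × Int) (it : Int × String) =>
      let (out, prev) := st
      let (i, t) := it
      if t = "[[" ∨ t = "]]" then
        (out ++ [PySem.Str.join "" (PySem.List.slice toks (some prev) (some i))] ++ [t], i + 1)
      else (out, prev))
    ([], 0)
  st.1 ++ [PySem.Str.join "" (PySem.List.slice toks (some st.2) none)]

-- ===== PRECONDITION & SPEC =====
def Spec_fix_expanded_stream (stream : List String) (out : List String) : Prop := out = fix_expanded_stream_alt stream
instance (stream : List String) (out : List String) : Decidable (Spec_fix_expanded_stream stream out) := by unfold Spec_fix_expanded_stream; infer_instance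

-- ===== CLAIM (what is proved, stated in full; the proofs are below) =====
def Claim_equal_fix_expanded_stream : Prop := ∀ (stream : List String), Dom_fix_expanded_stream stream → Spec_fix_expanded_stream stream (fix_expanded_stream stream)

-- ===== LEMMAS AND PROOFS =====

-- proof-only recursive characterisation of the segment list
def fesGoB : List String → List String
  | [] => [""]
  | t :: rest =>
    let r := fesGoB rest
    if t = "[[" ∨ t = "]]" then "" :: t :: r
    else match r with
      | x :: xs => (t ++ x) :: xs
      | [] => []

theorem fesGoB_ne_nil (l : List String) : fesGoB l ≠ [] := by
  induction l with
  | nil => simp [fesGoB]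
  | cons t rest ih =>
    simp only [fesGoB]
    split
    · simp
    · cases h : fesGoB rest with
      | nil => exact absurd h ih
      | cons x xs => simp

-- consText t r prepends t onto the first segment of r
def consText (t : String) : List String → List String
  | x :: xs => (t ++ x) :: xs
  | [] => []

theorem fes_invariant (l : List String) : ∀ (result : List String) (text : String),
    (let st := l.foldl (fun (st : List String × String) token =>
      let (result, text) := st
      if token = "[[" then (result ++ [text] ++ ["[["], "")
      else if token = "]]" then (result ++ [text] ++ ["]]"], "")
      else (result, text ++ token)) (result, text)
     st.1 ++ [st.2]) = result ++ consText text (fesGoB l) := by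
  induction l with
  | nil => intro result text; simp [fesGoB, consText]
  | cons t rest ih =>
    intro result text
    by_cases h1 : t = "[["
    · simp only [List.foldl_cons, h1]
      rw [ih]
      cases hr : fesGoB rest with
      | nil => exact absurd hr (fesGoB_ne_nil rest)
      | cons x xs => simp [fesGoB, consText, hr]
    · by_cases h2 : t = "]]"
      · simp only [List.foldl_cons, if_neg h1, if_pos h2]
        rw [ih]
        cases hr : fesGoB rest with
        | nil => exact absurd hr (fesGoB_ne_nil rest)
        | cons x xs => simp [fesGoB, consText, hr, h2]
      · simp only [List.foldl_cons, if_neg h1, if_neg h2]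
        rw [ih]
        have hd : ¬ (t = "[[" ∨ t = "]]") := by simp [h1, h2]
        cases hr : fesGoB rest with
        | nil => exact absurd hr (fesGoB_ne_nil rest)
        | cons x xs =>
          simp [fesGoB, hd, consText, hr, String.append_assoc]

theorem chars_join_nil (l : List (List Char)) : PySem.Chars.join [] l = l.flatten := by
  simp only [PySem.Chars.join, List.intercalate]
  induction l with
  | nil => simp
  | cons a t ih => cases t <;> simp_all [List.intersperse]

theorem str_join_nil : PySem.Str.join "" [] = "" := by
  rw [← String.toList_inj]
  simp [PySem.Str.toList_join, PySem.Chars.join_nil]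

theorem str_join_snoc (xs : List String) (t : String) :
    PySem.Str.join "" (xs ++ [t]) = PySem.Str.join "" xs ++ t := by
  rw [← String.toList_inj]
  simp [PySem.Str.toList_join, String.toList_append, chars_join_nil]

-- B's fold, generalized: processing the suffix 'rest' of toks starting at index i
-- with pending start p produces out ++ the segments of rest, with toks[p:i] joined
-- onto the first of them.
theorem enum_cons {α : Type} (x : α) (xs : List α) (s : Int) :
    PySem.List.enumerate (x :: xs) s = (s, x) :: PySem.List.enumerate xs (s + 1) := by
  simp [PySem.List.enumerate]

theorem fesB_inv (toks : List String) : ∀ (rest : List String) (i p : Nat) (out : List String),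
    toks.drop i = rest → p ≤ i →
    (let st := (PySem.List.enumerate rest (i : Int)).foldl
      (fun (st : List String × Int) (it : Int × String) =>
        if it.2 = "[[" ∨ it.2 = "]]" then
          (st.1 ++ [PySem.Str.join "" (PySem.List.slice toks (some st.2) (some it.1))] ++ [it.2], it.1 + 1)
        else (st.1, st.2))
      (out, (p : Int))
     st.1 ++ [PySem.Str.join "" (PySem.List.slice toks (some st.2) none)])
    = out ++ consText (PySem.Str.join "" (PySem.List.slice toks (some (p : Int)) (some (i : Int)))) (fesGoB rest) := by
  intro rest
  induction rest with
  | nil =>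
    intro i p out hdrop hpi
    have hlen : toks.length ≤ i := by
      have := congrArg List.length hdrop; simp at this; omega
    have hslice : PySem.List.slice toks (some (p : Int)) (some (i : Int)) = toks.drop p := by
      rw [PySem.List.slice_natCast]
      exact List.take_of_length_le (by simp; omega)
    simp only [PySem.List.enumerate, List.foldl_nil, hslice, fesGoB, consText,
      String.append_empty, PySem.List.slice_from_natCast]
  | cons t rest' ih =>
    intro i p out hdrop hpi
    have hget : toks[i]? = some t := by
      have : (toks.drop i)[0]? = some t := by rw [hdrop]; rfl
      simpa using this
    have hdrop' : toks.drop (i + 1) = rest' := by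
      have h := congrArg List.tail hdrop
      simpa [List.tail_drop] using h
    have hcast : (i : Int) + 1 = ((i + 1 : Nat) : Int) := by push_cast; ring
    by_cases hd : t = "[[" ∨ t = "]]"
    · rw [enum_cons]
      simp only [List.foldl_cons, if_pos hd, hcast]
      rw [ih (i + 1) (i + 1) _ hdrop' (le_refl _)]
      have hempty : PySem.List.slice toks (some ((i + 1 : Nat) : Int)) (some ((i + 1 : Nat) : Int)) = ([] : List String) := by
        rw [PySem.List.slice_natCast]; simp
      have hempty' : PySem.List.slice toks (some ((i : Int) + 1)) (some ((i : Int) + 1)) = ([] : List String) := by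
        rw [hcast]; exact hempty
      cases hr : fesGoB rest' with
      | nil => exact absurd hr (fesGoB_ne_nil rest')
      | cons x xs =>
        simp [fesGoB, hd, consText, hr, hempty', str_join_nil,
          String.empty_append, String.append_empty]
    · rw [enum_cons]
      simp only [List.foldl_cons, if_neg hd, hcast]
      rw [ih (i + 1) p _ hdrop' (by omega)]
      have hstep : PySem.List.slice toks (some (p : Int)) (some ((i + 1 : Nat) : Int))
          = PySem.List.slice toks (some (p : Int)) (some (i : Int)) ++ [t] := by
        rw [PySem.List.slice_natCast, PySem.List.slice_natCast]
        have h1 : i + 1 - p = (i - p) + 1 := by omega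
        rw [h1, List.take_add_one]
        have h2 : (toks.drop p)[i - p]? = some t := by
          rw [List.getElem?_drop]
          have : p + (i - p) = i := by omega
          rw [this, hget]
        rw [h2]; rfl
      rw [hstep, str_join_snoc]
      cases hr : fesGoB rest' with
      | nil => exact absurd hr (fesGoB_ne_nil rest')
      | cons x xs =>
        simp [fesGoB, hd, consText, hr, String.append_assoc]

-- ===== VERDICT (by name: the statement is the Claim_ definition above) =====
theorem fix_expanded_stream_spec : Claim_equal_fix_expanded_stream := by
  intro stream _
  unfold Spec_fix_expanded_stream fix_expanded_stream fix_expanded_stream_alt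
  have hA := fes_invariant stream [] ""
  simp only at hA ⊢
  rw [hA]
  have hB := fesB_inv stream stream 0 0 [] (by simp) (le_refl 0)
  simp only [Nat.cast_zero] at hB
  rw [hB]
  have hempty : PySem.List.slice stream (some ((0 : Nat) : Int)) (some ((0 : Nat) : Int)) = ([] : List String) := by
    rw [PySem.List.slice_natCast]; simp
  simp only [Nat.cast_zero] at hempty
  rw [hempty, str_join_nil]
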